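-- pv_equiv track=rewrite | github.com/LafyOjo/Python-Coding-Challenge | challenge.py | reverse_words_punctuation
-- ===== SOURCE A (Python) =====
-- def reverse_words_punctuation(sentence):
--     words = []
--     word = ""
--     for char in sentence:
--         if char.isalnum() or char == " ":
--             word += char
--         else:
--             words.append(word)
--             word = ""
--             words.append(char)
--     words.append(word)
--     words = words[::-1]
--     return "".join(words)
-- ===== SOURCE B (Python) =====
-- def reverse_words_punctuation(sentence):
--     cuts = [(i, c) for i, c in enumerate(sentence)
--             if not (c.isalnum() or c == " ")]
--     pieces = []
--     prev = 0
--     for i, c in cuts: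
--         pieces.append(sentence[prev:i])
--         pieces.append(c)
--         prev = i + 1
--     pieces.append(sentence[prev:])
--     return "".join(reversed(pieces))
-- ===== Notes on version B (the rewrite author's own statement) =====
-- stated objective: alternative
-- what changed: B is two staged passes — first collect all delimiter positions with an enumerate+filter comprehension, then cut the sentence into slices at those positions and join the pieces in reverse — instead of A's single char-by-char loop that grows the current chunk one character at a time.
import Mathlib
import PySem

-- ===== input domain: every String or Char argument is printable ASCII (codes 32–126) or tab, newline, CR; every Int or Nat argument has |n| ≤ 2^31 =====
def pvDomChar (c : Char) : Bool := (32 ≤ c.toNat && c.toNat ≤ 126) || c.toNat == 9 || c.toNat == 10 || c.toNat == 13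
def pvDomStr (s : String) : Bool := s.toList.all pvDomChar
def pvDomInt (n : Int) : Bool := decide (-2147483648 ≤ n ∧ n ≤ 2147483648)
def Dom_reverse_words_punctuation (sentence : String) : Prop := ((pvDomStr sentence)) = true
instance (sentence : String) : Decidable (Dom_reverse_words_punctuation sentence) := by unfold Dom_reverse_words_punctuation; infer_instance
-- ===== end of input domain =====

-- B replaces A's char-by-char chunk accumulator with two staged passes: collect the
-- delimiter positions by enumerate+filter, then cut the sentence into slices at those
-- positions and join the pieces in reverse; return values only, no mutation involved.

-- ===== PORT A =====
-- A's loop step: state = (words so far, current word); chars kept as List Char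
def pvAStep (st : List (List Char) × List Char) (c : Char) : List (List Char) × List Char :=
  if PySem.Chars.isalnum c || c == ' ' then (st.1, st.2 ++ [c])
  else (st.1 ++ [st.2, [c]], [])

def reverse_words_punctuation (sentence : String) : String :=
  let st := sentence.toList.foldl pvAStep ([], [])
  let words := st.1 ++ [st.2]
  String.ofList words.reverse.flatten

-- ===== PORT B =====
-- B's second pass: for each delimiter position (i, c), append sentence[prev:i] and c, set prev = i+1
def pvCutStep (l : List Char) (st : List (List Char) × Int) (p : Int × Char) :
    List (List Char) × Int :=
  (st.1 ++ [PySem.List.slice l (some st.2) (some p.1), [p.2]], p.1 + 1)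

def reverse_words_punctuation_alt (sentence : String) : String :=
  let l := sentence.toList
  let cuts := (PySem.List.enumerate l 0).filter
    (fun p => !(PySem.Chars.isalnum p.2 || p.2 == ' '))
  let st := cuts.foldl (pvCutStep l) ([], 0)
  let pieces := st.1 ++ [PySem.List.slice l (some st.2) none]
  String.ofList pieces.reverse.flatten

-- ===== PRECONDITION & SPEC =====
def Spec_reverse_words_punctuation (sentence : String) (out : String) : Prop := out = reverse_words_punctuation_alt sentence
instance (sentence : String) (out : String) : Decidable (Spec_reverse_words_punctuation sentence out) := by unfold Spec_reverse_words_punctuation; infer_instance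

-- ===== CLAIM =====
def Claim_equal_reverse_words_punctuation : Prop := ∀ (sentence : String), Dom_reverse_words_punctuation sentence → Spec_reverse_words_punctuation sentence (reverse_words_punctuation sentence)

-- ===== LEMMAS AND PROOFS =====

-- the chunk decomposition both programs compute: [w0, p0, w1, p1, …, wk]
def pvChunksFrom (w : List Char) : List Char → List (List Char)
  | [] => [w]
  | c :: r =>
    if PySem.Chars.isalnum c || c == ' ' then pvChunksFrom (w ++ [c]) r
    else w :: [c] :: pvChunksFrom [] r

theorem pvA_char (ws : List (List Char)) (w l : List Char) :
    (l.foldl pvAStep (ws, w)).1 ++ [(l.foldl pvAStep (ws, w)).2] = ws ++ pvChunksFrom w l := by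
  induction l generalizing ws w with
  | nil => simp [pvChunksFrom]
  | cons c r ih =>
    simp only [List.foldl_cons, pvAStep, pvChunksFrom]
    split
    · exact ih ws (w ++ [c])
    · rw [ih]; simp

-- B's fold invariant: processing the cuts of the suffix l = L.drop k, with the open
-- chunk spanning positions prev..k of L, produces the chunk decomposition of l.
theorem pvB_inv (L : List Char) (l : List Char) (k prev : ℕ) (ps : List (List Char))
    (hpk : prev ≤ k) (hl : L.drop k = l) :
    (((PySem.List.enumerate l (k : Int)).filter
        (fun p => !(PySem.Chars.isalnum p.2 || p.2 == ' '))).foldl (pvCutStep L)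
        (ps, (prev : Int))).1 ++
      [PySem.List.slice L
        (some (((PySem.List.enumerate l (k : Int)).filter
          (fun p => !(PySem.Chars.isalnum p.2 || p.2 == ' '))).foldl (pvCutStep L)
          (ps, (prev : Int))).2) none] =
    ps ++ pvChunksFrom ((L.drop prev).take (k - prev)) l := by
  induction l generalizing k prev ps with
  | nil =>
    have hk : L.length ≤ k := List.drop_eq_nil_iff.mp hl
    simp [PySem.List.enumerate, pvChunksFrom, PySem.List.slice_from_natCast,
      List.take_of_length_le (by rw [List.length_drop]; omega : (L.drop prev).length ≤ k - prev)]
  | cons c r ih =>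
    have hk : k < L.length := by
      by_contra h
      rw [List.drop_eq_nil_iff.2 (by omega)] at hl; exact List.cons_ne_nil _ _ hl.symm
    have hck : L[k]? = some c := by
      rw [show k = k + 0 by omega, ← List.getElem?_drop, hl]; rfl
    have hr : L.drop (k + 1) = r := by
      rw [← List.drop_drop]; simp [hl]
    rw [PySem.List.enumerate_cons]
    simp only [List.filter_cons]
    by_cases hkeep : PySem.Chars.isalnum c || c == ' '
    · simp only [hkeep, Bool.not_true, Bool.false_eq_true, if_false]
      have := ih (k + 1) prev ps (by omega) (by exact_mod_cast hr)
      rw [show ((k : Int) + 1) = ((k + 1 : ℕ) : Int) by push_cast; ring] at *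
      rw [this]
      have htake : (L.drop prev).take (k + 1 - prev) = (L.drop prev).take (k - prev) ++ [c] := by
        rw [show k + 1 - prev = (k - prev) + 1 by omega, List.take_add_one]
        have : (L.drop prev)[k - prev]? = some c := by
          rw [List.getElem?_drop, show prev + (k - prev) = k by omega, hck]
        simp [this]
      rw [htake]
      simp only [pvChunksFrom, if_pos hkeep]
    · rw [Bool.not_eq_true] at hkeep
      simp only [hkeep, Bool.not_false, if_true, List.foldl_cons, pvCutStep]
      have := ih (k + 1) (k + 1) (ps ++ [PySem.List.slice L (some (prev : Int)) (some (k : Int)), [c]])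
        (le_refl _) (by exact_mod_cast hr)
      rw [show ((k : Int) + 1) = ((k + 1 : ℕ) : Int) by push_cast; ring] at *
      rw [this]
      simp only [pvChunksFrom, hkeep, Bool.false_eq_true, if_false, PySem.List.slice_natCast]
      simp

-- ===== VERDICT =====
theorem reverse_words_punctuation_spec : Claim_equal_reverse_words_punctuation := by
  intro s _
  have hA := pvA_char [] [] s.toList
  have hB := pvB_inv s.toList s.toList 0 0 [] (le_refl 0) (by simp)
  simp only [List.nil_append, Nat.cast_zero, Nat.sub_zero, List.drop_zero, List.take_zero] at hA hB
  show String.ofList (((s.toList.foldl pvAStep ([], [])).1 ++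
      [(s.toList.foldl pvAStep ([], [])).2]).reverse.flatten) =
    String.ofList (((((PySem.List.enumerate s.toList 0).filter
        (fun p => !(PySem.Chars.isalnum p.2 || p.2 == ' '))).foldl (pvCutStep s.toList) ([], 0)).1 ++
      [PySem.List.slice s.toList
        (some ((((PySem.List.enumerate s.toList 0).filter
          (fun p => !(PySem.Chars.isalnum p.2 || p.2 == ' '))).foldl (pvCutStep s.toList) ([], 0)).2)) none]).reverse.flatten)
  rw [hA, hB]
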